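-- pv_equiv track=rewrite | github.com/scottdraper8/transmog | scripts/fix_markdown.py | fix_code_blocks
-- ===== SOURCE A (Python) =====
-- def fix_code_blocks(content):
--     """Add 'text' as the language specifier for code blocks that don't have one."""
--     lines = content.split("\n")
--     in_code_block = False
--
--     for i, line in enumerate(lines):
--         stripped = line.strip()
--         if stripped.startswith("```"):
--             if not in_code_block:
--                 if stripped == "```":
--                     # Add 'text' language specifier to unmarked code blocks
--                     lines[i] = "```text"
--             # Track code block state
--             in_code_block = not in_code_block
--
--     return "\n".join(lines)
-- ===== SOURCE B (Python) =====
-- def fix_code_blocks(content):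
--     """Add 'text' as the language specifier for code blocks that don't have one."""
--     lines = content.split("\n")
--     # index every fence line once; fences alternate open/close, so even positions open
--     fence_idxs = [i for i, line in enumerate(lines) if line.strip().startswith("```")]
--     for pos, i in enumerate(fence_idxs):
--         if pos % 2 == 0 and lines[i].strip() == "```":
--             lines[i] = "```text"
--     return "\n".join(lines)
-- ===== Notes on version B (the rewrite author's own statement) =====
-- stated objective: alternative
-- what changed: Replaces the running in_code_block boolean state machine with an explicit pass that collects all fence-line indices and rewrites the bare fences at even positions of that index list (fences alternate open/close).
import Mathlib
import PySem

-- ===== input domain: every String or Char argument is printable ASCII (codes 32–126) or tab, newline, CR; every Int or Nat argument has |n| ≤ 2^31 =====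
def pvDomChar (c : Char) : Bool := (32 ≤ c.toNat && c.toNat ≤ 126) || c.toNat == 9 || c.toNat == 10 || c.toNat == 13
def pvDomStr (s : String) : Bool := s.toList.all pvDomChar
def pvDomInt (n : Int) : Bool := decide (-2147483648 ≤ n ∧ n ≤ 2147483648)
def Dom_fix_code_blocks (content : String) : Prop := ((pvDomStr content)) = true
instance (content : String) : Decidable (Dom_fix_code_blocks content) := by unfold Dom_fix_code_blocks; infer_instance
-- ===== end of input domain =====

-- B replaces A's running in_code_block boolean with an index of all fence lines plus a
-- parity test on the position in that index list (alternative decomposition, same cost).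

-- ===== PORT A =====
-- A's for-loop with the in_code_block flag, as structural recursion over the lines.
def fixLoopA (st : Bool) : List (List Char) → List (List Char)
  | [] => []
  | ln :: rest =>
    let stripped := PySem.Chars.strip ln
    if PySem.Chars.startswith stripped "```".toList then
      (if !st then (if stripped == "```".toList then "```text".toList else ln) else ln)
        :: fixLoopA (!st) rest
    else
      ln :: fixLoopA st rest

def fix_code_blocks (content : String) : String :=
  String.ofList
    (PySem.Chars.join "\n".toList (fixLoopA false (PySem.Chars.splitOn content.toList "\n".toList)))

-- ===== PORT B =====
def fix_code_blocks_alt (content : String) : String :=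
  let lines := PySem.Chars.splitOn content.toList "\n".toList
  let fenceIdxs := ((PySem.List.enumerate lines).filter
      (fun p => PySem.Chars.startswith (PySem.Chars.strip p.2) "```".toList)).map (·.1)
  let fixed := (PySem.List.enumerate fenceIdxs).foldl
      (fun ls p =>
        if PySem.Int.mod p.1 2 == 0
            && PySem.Chars.strip (PySem.List.pyGetD ls p.2 []) == "```".toList then
          PySem.List.pySetD ls p.2 "```text".toList
        else ls)
      lines
  String.ofList (PySem.Chars.join "\n".toList fixed)

-- ===== PRECONDITION & SPEC =====
def Spec_fix_code_blocks (content : String) (out : String) : Prop := out = fix_code_blocks_alt content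
instance (content : String) (out : String) : Decidable (Spec_fix_code_blocks content out) := by unfold Spec_fix_code_blocks; infer_instance

-- ===== CLAIM (what is proved, stated in full; the proofs are below) =====
def Claim_equal_fix_code_blocks : Prop := ∀ (content : String), Dom_fix_code_blocks content → Spec_fix_code_blocks content (fix_code_blocks content)

-- ===== LEMMAS AND PROOFS =====

-- B's loop body, named for the proofs (definitionally the lambda in fix_code_blocks_alt).
def stepB (ls : List (List Char)) (p : Int × Int) : List (List Char) :=
  if PySem.Int.mod p.1 2 == 0
      && PySem.Chars.strip (PySem.List.pyGetD ls p.2 []) == "```".toList then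
    PySem.List.pySetD ls p.2 "```text".toList
  else ls

-- B's fence-index list, named for the proofs.
def fenceIdxsOf (ls : List (List Char)) : List Int :=
  ((PySem.List.enumerate ls).filter
      (fun p => PySem.Chars.startswith (PySem.Chars.strip p.2) "```".toList)).map (·.1)

-- middle spec both ports are reduced to: carry the COUNT of fences seen; its parity decides open/close.
def fixC (c : Int) : List (List Char) → List (List Char)
  | [] => []
  | ln :: rest =>
    if PySem.Chars.startswith (PySem.Chars.strip ln) "```".toList then
      (if PySem.Int.mod c 2 == 0 && PySem.Chars.strip ln == "```".toList then "```text".toList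
       else ln) :: fixC (c + 1) rest
    else
      ln :: fixC c rest

theorem mod_two_toggle (c : Int) :
    (PySem.Int.mod (c + 1) 2 == 0) = !(PySem.Int.mod c 2 == 0) := by
  rw [PySem.Int.mod_eq_emod_of_pos (by norm_num), PySem.Int.mod_eq_emod_of_pos (by norm_num)]
  have h2 : (c+1)%2 = 1 - c%2 := by omega
  rcases (by omega : c%2=0 ∨ c%2=1) with h|h <;> simp [h, h2]

theorem fixLoopA_eq_fixC (ls : List (List Char)) (c : Int) :
    fixLoopA (!(PySem.Int.mod c 2 == 0)) ls = fixC c ls := by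
  induction ls generalizing c with
  | nil => rfl
  | cons ln rest ih =>
    simp only [fixLoopA, fixC]
    split
    · have htail : fixLoopA (PySem.Int.mod c 2 == 0) rest = fixC (c + 1) rest := by
        rw [show (PySem.Int.mod c 2 == 0) = !(PySem.Int.mod (c+1) 2 == 0) from by
          rw [mod_two_toggle]; simp]
        exact ih (c+1)
      rw [Bool.not_not, htail]
      cases hm : (PySem.Int.mod c 2 == 0) <;>
        cases hs : (PySem.Chars.strip ln == "```".toList) <;> simp
    · rw [ih c]

theorem pyGetD_cons_pos {α : Type} (x : α) (xs : List α) (i : Int) (d : α) (h : 1 ≤ i) :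
    PySem.List.pyGetD (x :: xs) i d = PySem.List.pyGetD xs (i - 1) d := by
  simp only [PySem.List.pyGetD, PySem.List.pyGet?, PySem.List.pyIdx?]
  have h0 : (0:Int) ≤ i := by omega
  have h1 : (0:Int) ≤ i - 1 := by omega
  have hk : i.toNat = (i-1).toNat + 1 := by omega
  simp only [h0, h1, if_pos, List.length_cons]
  split_ifs with h2 h3 h3 <;> try (exfalso; omega)
  · rw [hk]; simp
  · rfl

theorem pySetD_cons_pos {α : Type} (x : α) (xs : List α) (i : Int) (v : α) (h : 1 ≤ i) :
    PySem.List.pySetD (x :: xs) i v = x :: PySem.List.pySetD xs (i - 1) v := by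
  simp only [PySem.List.pySetD, PySem.List.pySet?, PySem.List.pyIdx?]
  have h0 : (0:Int) ≤ i := by omega
  have h1 : (0:Int) ≤ i - 1 := by omega
  have hk : i.toNat = (i-1).toNat + 1 := by omega
  simp only [h0, h1, if_pos, List.length_cons]
  split_ifs with h2 h3 h3 <;> try (exfalso; omega)
  · rw [hk]; simp
  · rfl

-- a fold whose set/get indices are all ≥ 1 never touches the head
theorem foldl_stepB_cons (ps : List (Int × Int)) (x : List Char) (ls : List (List Char))
    (h : ∀ p ∈ ps, 1 ≤ p.2) :
    ps.foldl stepB (x :: ls)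
      = x :: (ps.map (fun p => (p.1, p.2 - 1))).foldl stepB ls := by
  induction ps generalizing ls with
  | nil => rfl
  | cons p ps ih =>
    have hp : 1 ≤ p.2 := h p (by simp)
    simp only [List.foldl_cons, List.map_cons]
    rw [show stepB (x :: ls) p = x :: stepB ls (p.1, p.2 - 1) from ?_,
        ih _ (fun q hq => h q (by simp [hq]))]
    simp only [stepB, pyGetD_cons_pos x ls p.2 _ hp]
    split
    · exact pySetD_cons_pos x ls p.2 _ hp
    · rfl

theorem enumerate_succ_shift {α : Type} (xs : List α) (s : Int) :
    PySem.List.enumerate xs (s + 1) = (PySem.List.enumerate xs s).map (fun p => (p.1 + 1, p.2)) := by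
  induction xs generalizing s with
  | nil => simp [PySem.List.enumerate_nil]
  | cons x xs ih => simp [PySem.List.enumerate_cons, ih]

theorem enumerate_map {α β : Type} (f : α → β) (xs : List α) (s : Int) :
    PySem.List.enumerate (xs.map f) s = (PySem.List.enumerate xs s).map (fun p => (p.1, f p.2)) := by
  induction xs generalizing s with
  | nil => simp [PySem.List.enumerate_nil]
  | cons x xs ih => simp [PySem.List.enumerate_cons, ih]

theorem fenceIdxsOf_cons (ln : List Char) (rest : List (List Char)) :
    fenceIdxsOf (ln :: rest)
      = (if PySem.Chars.startswith (PySem.Chars.strip ln) "```".toList then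
          0 :: (fenceIdxsOf rest).map (· + 1)
        else (fenceIdxsOf rest).map (· + 1)) := by
  simp only [fenceIdxsOf, PySem.List.enumerate_cons]
  rw [show (0:Int) + 1 = 0 + 1 from rfl, enumerate_succ_shift]
  rw [List.filter_cons, List.filter_map, List.map_map]
  split <;> simp [List.map_map] <;> rfl

theorem nonneg_mem_fenceIdxsOf (ls : List (List Char)) (i : Int) (h : i ∈ fenceIdxsOf ls) : 0 ≤ i := by
  simp only [fenceIdxsOf, List.mem_map, List.mem_filter] at h
  obtain ⟨p, ⟨hp, _⟩, rfl⟩ := h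
  obtain ⟨k, hk, rfl⟩ := (PySem.List.mem_enumerate_iff _ _ _).1 hp
  simp

theorem snd_mem_enumerate {α : Type} (xs : List α) (s : Int) (p : Int × α)
    (h : p ∈ PySem.List.enumerate xs s) : p.2 ∈ xs := by
  obtain ⟨k, hk, rfl⟩ := (PySem.List.mem_enumerate_iff _ _ _).1 h
  simp

-- fold over indices shifted by +1 starting from x :: rest = x :: (fold over the indices from rest)
theorem foldl_stepB_shift (rest : List (List Char)) (c : Int) (x : List Char) :
    (PySem.List.enumerate ((fenceIdxsOf rest).map (· + 1)) c).foldl stepB (x :: rest)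
      = x :: (PySem.List.enumerate (fenceIdxsOf rest) c).foldl stepB rest := by
  rw [enumerate_map]
  rw [foldl_stepB_cons _ _ _ ?hge]
  · congr 1
    rw [List.map_map]
    have hid : ((fun p : Int × Int => (p.1, p.2 - 1)) ∘ (fun p : Int × Int => (p.1, p.2 + 1))) = id := by
      funext p; simp
    rw [hid, List.map_id]
  case hge =>
    intro p hp
    simp only [List.mem_map] at hp
    obtain ⟨q, hq, rfl⟩ := hp
    have := nonneg_mem_fenceIdxsOf rest q.2 (snd_mem_enumerate _ _ _ hq)
    simp; omega

theorem foldl_stepB_eq_fixC (ls : List (List Char)) (c : Int) :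
    (PySem.List.enumerate (fenceIdxsOf ls) c).foldl stepB ls = fixC c ls := by
  induction ls generalizing c with
  | nil => rfl
  | cons ln rest ih =>
    rw [fenceIdxsOf_cons]
    by_cases hf : PySem.Chars.startswith (PySem.Chars.strip ln) "```".toList
    · rw [if_pos hf, PySem.List.enumerate_cons]
      simp only [List.foldl_cons]
      have hstep : stepB (ln :: rest) (c, 0)
          = (if PySem.Int.mod c 2 == 0 && PySem.Chars.strip ln == "```".toList then
              "```text".toList else ln) :: rest := by
        simp only [stepB, PySem.List.pyGetD_zero_cons]
        split
        · simp [PySem.List.pySetD, PySem.List.pySet?, PySem.List.pyIdx?]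
        · rfl
      rw [hstep]
      split
      · rw [foldl_stepB_shift, ih (c+1)]
        simp only [fixC]; rw [if_pos hf, if_pos (by assumption)]
      · rw [foldl_stepB_shift, ih (c+1)]
        simp only [fixC]; rw [if_pos hf, if_neg (by assumption)]
    · rw [if_neg hf, foldl_stepB_shift, ih c]
      simp only [fixC]; rw [if_neg hf]

-- ===== VERDICT (by name: the statement is the Claim_ definition above) =====
theorem fix_code_blocks_spec : Claim_equal_fix_code_blocks := by
  intro content _
  show fix_code_blocks content = fix_code_blocks_alt content
  unfold fix_code_blocks fix_code_blocks_alt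
  simp only []
  congr 1
  rw [show (false : Bool) = !(PySem.Int.mod 0 2 == 0) from by decide,
      fixLoopA_eq_fixC _ 0, ← foldl_stepB_eq_fixC _ 0]
  rfl
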